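-- pv_equiv track=rewrite | github.com/fffredericky/Skool_project | network_functions.py | get_friends_of_friends
-- ===== SOURCE A (Python) =====
-- from typing import List, Tuple, Dict, TextIO
--
-- def get_friends_of_friends(person_to_friends: Dict[str, List[str]], \
--     person: str) -> List[str]:
--     """Given person_to_friends and person (in the same format as the dictionary
--     keys), return the list of names of people who are friends of the named
--     person's friends.
--
--     >>> get_friends_of_friends({'a b': ['a c', 'a d'], 'b c': ['b d', 'a d']}, 'a b')
--     ['b c']
--     >>> get_friends_of_friends({'a b': ['a c', 'a d'], 'b c': ['b d', 'a d'], 'a c': ['e f']}, 'a b')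
--     ['b c', 'e f']
--     """
--     returnlist = []
--     target_friend = []
--     if person in person_to_friends:
--         target_friend = target_friend + person_to_friends[person]
--     for friend in person_to_friends:
--         if person in person_to_friends[friend]:
--             target_friend.append(friend)
--     for friend in person_to_friends:
--         for name in target_friend:
--             if name == friend:
--                 returnlist = returnlist + person_to_friends[friend]
--             if name in person_to_friends[friend]:
--                 returnlist.append(friend)
--     while person in returnlist:
--         returnlist.remove(person)
--     returnlist.sort()
--     return returnlist
-- ===== SOURCE B (Python) =====
-- def get_friends_of_friends(person_to_friends, person):
--     # Build a reverse adjacency index once (name -> people who list that name),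
--     # then gather each target name's friend list and reverse entry directly.
--     rev = {}
--     for f, fl in person_to_friends.items():
--         for n in dict.fromkeys(fl):
--             rev.setdefault(n, []).append(f)
--     targets = person_to_friends.get(person, []) + rev.get(person, [])
--     res = []
--     for n in targets:
--         res += person_to_friends.get(n, []) + rev.get(n, [])
--     return sorted(x for x in res if x != person)
-- ===== Notes on version B (the rewrite author's own statement) =====
-- stated objective: alternative
-- what changed: A scans every person's friend list once per target name in a doubly nested loop and strips the person afterwards by repeated .remove; B builds a reverse adjacency index (name -> people listing that name) in one pass and then gathers each target name's contribution by two dictionary lookups, filtering and sorting at the end.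
import Mathlib
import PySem

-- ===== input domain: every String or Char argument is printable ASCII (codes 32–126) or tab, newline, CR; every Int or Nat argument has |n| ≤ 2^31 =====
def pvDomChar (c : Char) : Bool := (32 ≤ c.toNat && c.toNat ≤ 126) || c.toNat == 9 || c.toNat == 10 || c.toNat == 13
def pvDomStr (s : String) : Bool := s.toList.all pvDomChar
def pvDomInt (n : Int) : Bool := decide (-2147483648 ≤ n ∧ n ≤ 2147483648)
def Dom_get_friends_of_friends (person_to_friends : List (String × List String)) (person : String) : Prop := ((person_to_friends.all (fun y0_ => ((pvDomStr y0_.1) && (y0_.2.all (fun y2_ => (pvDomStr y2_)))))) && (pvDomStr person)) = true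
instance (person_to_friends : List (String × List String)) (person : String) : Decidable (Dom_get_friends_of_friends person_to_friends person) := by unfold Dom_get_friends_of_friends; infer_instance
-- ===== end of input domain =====

-- B replaces A's nested sweep (every person × every target) by a reverse adjacency index built
-- once, after which each target name's contribution is gathered by two lookups (objective: alternative).

-- ===== PORT A =====

-- 'while person in returnlist: returnlist.remove(person)' — repeated first-occurrence removal
def pyRemoveAll (v : String) (l : List String) : List String :=
  match h : PySem.List.remove? l v with
  | some l' => pyRemoveAll v l'
  | none => l
termination_by l.length
decreasing_by
  have hv : v ∈ l := by
    by_contra hv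
    rw [(PySem.List.remove?_eq_none_iff l v).mpr hv] at h
    cases h
  rw [PySem.List.remove?_eq_some_erase l v hv] at h
  injection h with h2
  subst h2
  have h3 := List.length_erase_of_mem hv
  have h4 : 0 < l.length := List.length_pos_of_mem hv
  omega

def get_friends_of_friends (person_to_friends : List (String × List String)) (person : String) : List String :=
  let d := PySem.Dict.ofList person_to_friends
  let target_friend : List String := []
  let target_friend := if d.contains person then target_friend ++ d.getD person [] else target_friend
  let target_friend := d.keys.foldl
    (fun acc friend => if person ∈ d.getD friend [] then acc ++ [friend] else acc) target_friend
  let returnlist := d.keys.foldl (fun acc friend =>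
      target_friend.foldl (fun a name =>
        let a := if name = friend then a ++ d.getD friend [] else a
        if name ∈ d.getD friend [] then a ++ [friend] else a) acc) []
  PySem.List.sorted (pyRemoveAll person returnlist) (fun x => x) false

-- ===== PORT B =====
def get_friends_of_friends_alt (person_to_friends : List (String × List String)) (person : String) : List String :=
  let d := PySem.Dict.ofList person_to_friends
  -- rev: name -> people who list that name (dict.fromkeys(fl) = ordered dedup;
  -- rev.setdefault(n, []).append(f) = modify n [] (· ++ [f]))
  let rev := d.items.foldl (fun r p =>
      (PySem.List.dedup p.2).foldl (fun r n => r.modify n [] (· ++ [p.1])) r)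
    (PySem.Dict.empty : PySem.Dict String (List String))
  let targets := d.getD person [] ++ rev.getD person []
  let res := targets.foldl (fun acc n => acc ++ (d.getD n [] ++ rev.getD n [])) []
  PySem.List.sorted (res.filter (fun x => decide (x ≠ person))) (fun x => x) false

-- ===== PRECONDITION & SPEC =====
def Spec_get_friends_of_friends (person_to_friends : List (String × List String)) (person : String) (out : List String) : Prop := out = get_friends_of_friends_alt person_to_friends person
instance (person_to_friends : List (String × List String)) (person : String) (out : List String) : Decidable (Spec_get_friends_of_friends person_to_friends person out) := by unfold Spec_get_friends_of_friends; infer_instance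

-- ===== CLAIM (what is proved, stated in full; the proofs are below) =====
def Claim_equal_get_friends_of_friends : Prop := ∀ (person_to_friends : List (String × List String)) (person : String), Dom_get_friends_of_friends person_to_friends person → Spec_get_friends_of_friends person_to_friends person (get_friends_of_friends person_to_friends person)

-- ===== LEMMAS AND PROOFS =====

-- filtering out v absorbs one .erase v
theorem filter_ne_erase (l : List String) (v : String) :
    (l.erase v).filter (fun x => decide (x ≠ v)) = l.filter (fun x => decide (x ≠ v)) := by
  induction l with
  | nil => simp
  | cons x t ih =>
    by_cases hx : x = v
    · subst hx; simp [List.erase_cons_head]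
    · rw [List.erase_cons_tail (by simp [hx])]
      simp only [List.filter_cons]
      rw [ih]

-- repeated .remove(v) until v is gone IS filtering v out
theorem pyRemoveAll_eq_filter (v : String) (l : List String) :
    pyRemoveAll v l = l.filter (fun x => decide (x ≠ v)) := by
  fun_induction pyRemoveAll v l with
  | case1 l l' h ih =>
    have hv : v ∈ l := by
      by_contra hv
      rw [(PySem.List.remove?_eq_none_iff l v).mpr hv] at h
      cases h
    rw [PySem.List.remove?_eq_some_erase l v hv] at h
    injection h with h2
    subst h2
    rw [ih, filter_ne_erase]
  | case2 l h =>
    have hv : v ∉ l := (PySem.List.remove?_eq_none_iff l v).mp h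
    rw [List.filter_eq_self.mpr]
    intro a ha
    simp only [ne_eq, decide_eq_true_eq]
    exact fun e => hv (e ▸ ha)

-- the per-key contribution of A's inner loop, as a function of the target list
theorem inner_loop_eq (target fl : List String) (f : String) (acc : List String) :
    target.foldl (fun a name =>
        let a := if name = f then a ++ fl else a
        if name ∈ fl then a ++ [f] else a) acc
      = acc ++ target.flatMap (fun n => (if n = f then fl else []) ++ (if n ∈ fl then [f] else [])) := by
  have hstep : (fun (a : List String) (name : String) =>
        let a := if name = f then a ++ fl else a
        if name ∈ fl then a ++ [f] else a)
      = fun a n => a ++ ((if n = f then fl else []) ++ (if n ∈ fl then [f] else [])) := by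
    funext a n
    by_cases h1 : n = f
    · subst h1; by_cases h2 : n ∈ fl <;> simp [h2]
    · by_cases h2 : n ∈ fl <;> simp [h1, h2]
  rw [hstep, PySem.List.foldl_append_eq_flatMap]

-- swapping the two loops of a double flatMap permutes the result
theorem flatMap_swap_perm (l1 l2 : List String) (g : String → String → List String) :
    (l1.flatMap fun a => l2.flatMap fun b => g a b).Perm
      (l2.flatMap fun b => l1.flatMap fun a => g a b) := by
  induction l1 with
  | nil => simp
  | cons a t ih =>
    rw [List.flatMap_cons]
    refine (ih.append_left _).trans ?_
    have hr : (l2.flatMap fun b => (a :: t).flatMap fun a => g a b)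
        = l2.flatMap fun b => g a b ++ t.flatMap fun a => g a b := by
      apply List.flatMap_congr
      intro b _
      rw [List.flatMap_cons]
    rw [hr]
    exact List.flatMap_append_perm l2 _ _

-- gathering singletons over a Nodup key list = one dictionary lookup
theorem flatMap_ite_getD (keys : List String) (v : String → List String) (n : String)
    (hnd : keys.Nodup) (hout : n ∉ keys → v n = []) :
    keys.flatMap (fun f => if n = f then v f else []) = v n := by
  induction keys with
  | nil => simp [hout (by simp)]
  | cons k t ih =>
    rw [List.flatMap_cons]
    by_cases hk : n = k
    · subst hk
      have : t.flatMap (fun f => if n = f then v f else []) = [] := by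
        apply List.flatMap_eq_nil_iff.mpr
        intro f hf
        rw [if_neg]
        exact fun e => (List.nodup_cons.mp hnd).1 (e ▸ hf)
      simp [this]
    · rw [if_neg hk, List.nil_append]
      exact ih (List.nodup_cons.mp hnd).2
        (fun hn => hout (by simp [hk, hn]))

-- emitting [f] exactly when a test holds IS filtering
theorem flatMap_ite_singleton_eq_filter (l : List String) (p : String → Prop)
    [DecidablePred p] :
    l.flatMap (fun f => if p f then [f] else []) = l.filter (fun f => decide (p f)) := by
  induction l with
  | nil => simp
  | cons x t ih =>
    rw [List.flatMap_cons, List.filter_cons]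
    by_cases hx : p x <;> simp [hx, ih]

-- the reverse index: rev.getD n [] lists, in key order, everyone whose friend list contains n
theorem rev_getD (items : List (String × List String)) (n : String) :
    ((items.foldl (fun r p =>
        (PySem.List.dedup p.2).foldl (fun r m => r.modify m [] (· ++ [p.1])) r)
      (PySem.Dict.empty : PySem.Dict String (List String))).getD n [])
    = (items.filter (fun p => decide (n ∈ p.2))).map (·.1) := by
  have key : ∀ (L : List (String × List String)) (r : PySem.Dict String (List String)),
      (L.foldl (fun r p => (PySem.List.dedup p.2).foldl (fun r m => r.modify m [] (· ++ [p.1])) r) r).getD n []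
        = r.getD n [] ++ (L.filter (fun p => decide (n ∈ p.2))).map (·.1) := by
    intro L
    induction L with
    | nil => simp
    | cons p t ih =>
      intro r
      rw [List.foldl_cons, ih, List.filter_cons]
      have hinner : ((PySem.List.dedup p.2).foldl (fun r m => r.modify m [] (· ++ [p.1])) r).getD n []
          = r.getD n [] ++ (if n ∈ p.2 then [p.1] else []) := by
        have hmapped : (PySem.List.dedup p.2).foldl (fun r m => r.modify m [] (· ++ [p.1])) r
            = ((PySem.List.dedup p.2).map (fun m => (m, p.1))).foldl
                (fun (r : PySem.Dict String (List String)) q => r.modify q.1 [] (· ++ [q.2])) r := by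
          rw [List.foldl_map]
        rw [hmapped, PySem.Dict.getD_foldl_modify_append]
        congr 1
        rw [List.filter_map, List.map_map]
        have hfun : ((fun q : String × String => q.1 == n) ∘ fun m => (m, p.1)) = fun m => m == n := by
          funext m; simp
        rw [hfun]
        by_cases hn : n ∈ p.2
        · have hmem : n ∈ PySem.List.dedup p.2 := (PySem.List.mem_dedup p.2 n).mpr hn
          have hnd := PySem.List.nodup_dedup p.2
          rw [if_pos hn, List.filter_beq n, List.count_eq_one_of_mem hnd hmem]
          rfl
        · rw [if_neg hn, List.filter_eq_nil_iff.mpr, List.map_nil]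
          intro m hm
          simp only [beq_iff_eq]
          intro e
          exact hn (e ▸ (PySem.List.mem_dedup p.2 m).mp hm)
      rw [hinner]
      by_cases hn : n ∈ p.2 <;> simp [hn]
  rw [key]
  simp

-- pointwise-permuted chunks give permuted concatenations
theorem flatMap_perm_of_forall (l : List String) (g h : String → List String)
    (H : ∀ f ∈ l, (g f).Perm (h f)) : (l.flatMap g).Perm (l.flatMap h) := by
  induction l with
  | nil => simp
  | cons x t ih =>
    rw [List.flatMap_cons, List.flatMap_cons]
    exact (H x List.mem_cons_self).append (ih (fun f hf => H f (List.mem_cons_of_mem _ hf)))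

-- ===== VERDICT (by name: the statement is the Claim_ definition above) =====
theorem get_friends_of_friends_spec : Claim_equal_get_friends_of_friends := by
  intro ptf person _
  unfold Spec_get_friends_of_friends get_friends_of_friends get_friends_of_friends_alt
  simp only []
  set d := PySem.Dict.ofList ptf with hd
  have hnd : d.keys.Nodup := PySem.Dict.nodup_keys_ofList ptf
  have hitems : d.items = d.keys.map (fun k => (k, d.getD k [])) :=
    PySem.Dict.items_eq_map_keys d hnd []
  -- rev's lookups, expressed over the key list
  have hrev : ∀ n, ((d.items.foldl (fun r p =>
        (PySem.List.dedup p.2).foldl (fun r m => r.modify m [] (· ++ [p.1])) r)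
      (PySem.Dict.empty : PySem.Dict String (List String))).getD n [])
      = d.keys.filter (fun f => decide (n ∈ d.getD f [])) := by
    intro n
    rw [rev_getD, hitems, List.filter_map, List.map_map]
    have h1 : ((fun p : String × List String => decide (n ∈ p.2)) ∘ fun k => (k, d.getD k []))
        = fun f => decide (n ∈ d.getD f []) := by funext f; rfl
    have h2 : ((fun p : String × List String => p.1) ∘ fun k => (k, d.getD k []))
        = fun k => k := by funext k; rfl
    rw [h1, h2, List.map_id']
  -- the two target lists coincide
  have htgtA : d.keys.foldl (fun acc friend => if person ∈ d.getD friend [] then acc ++ [friend] else acc)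
        (if d.contains person then ([] : List String) ++ d.getD person [] else [])
      = d.getD person [] ++ d.keys.filter (fun f => decide (person ∈ d.getD f [])) := by
    rw [PySem.List.foldl_append_ite_eq_filter]
    congr 1
    by_cases hc : d.contains person
    · simp [hc]
    · simp [hc, PySem.Dict.getD_of_not_contains d [] (by simpa using hc)]
  rw [htgtA, hrev person]
  set T := d.getD person [] ++ d.keys.filter (fun f => decide (person ∈ d.getD f [])) with hT
  -- A's double loop as a flatMap
  have hA : d.keys.foldl (fun acc friend =>
      T.foldl (fun a name =>
        let a := if name = friend then a ++ d.getD friend [] else a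
        if name ∈ d.getD friend [] then a ++ [friend] else a) acc) []
      = d.keys.flatMap (fun f =>
          T.flatMap (fun n => (if n = f then d.getD f [] else []) ++ (if n ∈ d.getD f [] then [f] else []))) := by
    have : (fun (acc : List String) (friend : String) =>
        T.foldl (fun a name =>
          let a := if name = friend then a ++ d.getD friend [] else a
          if name ∈ d.getD friend [] then a ++ [friend] else a) acc)
        = fun acc f => acc ++ T.flatMap (fun n => (if n = f then d.getD f [] else []) ++ (if n ∈ d.getD f [] then [f] else [])) := by
      funext acc f
      exact inner_loop_eq T (d.getD f []) f acc
    rw [this, PySem.List.foldl_append_eq_flatMap]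
    simp
  simp only [] at hA
  rw [hA]
  -- B's gathering loop as a flatMap
  have hB : T.foldl (fun acc n => acc ++ (d.getD n [] ++
        ((d.items.foldl (fun r p =>
            (PySem.List.dedup p.2).foldl (fun r m => r.modify m [] (· ++ [p.1])) r)
          (PySem.Dict.empty : PySem.Dict String (List String))).getD n []))) []
      = T.flatMap (fun n => d.getD n [] ++ d.keys.filter (fun f => decide (n ∈ d.getD f []))) := by
    rw [PySem.List.foldl_append_eq_flatMap]
    rw [List.nil_append]
    exact List.flatMap_congr (fun n _ => by rw [hrev n])
  rw [hB, pyRemoveAll_eq_filter]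
  -- reduce to a permutation of the unsorted lists
  have hperm : (d.keys.flatMap (fun f =>
      T.flatMap (fun n => (if n = f then d.getD f [] else []) ++ (if n ∈ d.getD f [] then [f] else [])))).Perm
      (T.flatMap (fun n => d.getD n [] ++ d.keys.filter (fun f => decide (n ∈ d.getD f [])))) := by
    refine (flatMap_swap_perm d.keys T _).trans ?_
    apply flatMap_perm_of_forall
    intro n _
    refine ((List.flatMap_append_perm d.keys
        (fun f => if n = f then d.getD f [] else [])
        (fun f => if n ∈ d.getD f [] then [f] else [])).symm).trans ?_
    rw [flatMap_ite_getD d.keys (fun f => d.getD f []) n hnd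
        (fun hnk => PySem.Dict.getD_of_not_contains d []
          (by rw [PySem.Dict.contains_eq_decide_mem_keys]; simpa using hnk)),
      flatMap_ite_singleton_eq_filter]
  rw [(PySem.List.sorted_id_eq_sorted_id_iff_perm _ _).mpr (hperm.filter _)]
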